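-- pv_equiv track=rewrite | github.com/darthmanwe/lorekeeper | src/eval.py | _extract_entity_mentions
-- ===== SOURCE A (Python) =====
-- def _extract_entity_mentions(
--     text: str,
--     known_entities: set[str],
-- ) -> set[str]:
--     """Extract mentions of known entities from generated text.
--
--     Uses case-insensitive matching with word boundary awareness.
--     """
--     found: set[str] = set()
--     text_lower = text.lower()
--     for entity in known_entities:
--         if entity.lower() in text_lower:
--             found.add(entity)
--     return found
-- ===== SOURCE B (Python) =====
-- def _extract_entity_mentions(
--     text: str,
--     known_entities: set[str],
-- ) -> set[str]:
--     """Extract mentions of known entities via a substring index: instead of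
--     scanning the text once per entity, hash all lowercased entities, then take
--     every text substring whose length is an entity length and look it up."""
--     text_lower = text.lower()
--     lengths = {len(e) for e in known_entities}
--     lowers = {e.lower() for e in known_entities}
--     hits: set[str] = set()
--     for L in lengths:
--         for i in range(len(text_lower) - L + 1):
--             sub = text_lower[i:i + L]
--             if sub in lowers:
--                 hits.add(sub)
--     return {e for e in known_entities if e.lower() in hits}
-- ===== Notes on version B (the rewrite author's own statement) =====
-- stated objective: faster
-- what changed: Instead of scanning the whole text once per entity, B hashes all lowercased entities into a set, enumerates every substring of the lowered text whose length is some entity length and looks each up, then keeps the entities whose lowercase form was hit; the per-entity text scan disappears.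
import Mathlib
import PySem

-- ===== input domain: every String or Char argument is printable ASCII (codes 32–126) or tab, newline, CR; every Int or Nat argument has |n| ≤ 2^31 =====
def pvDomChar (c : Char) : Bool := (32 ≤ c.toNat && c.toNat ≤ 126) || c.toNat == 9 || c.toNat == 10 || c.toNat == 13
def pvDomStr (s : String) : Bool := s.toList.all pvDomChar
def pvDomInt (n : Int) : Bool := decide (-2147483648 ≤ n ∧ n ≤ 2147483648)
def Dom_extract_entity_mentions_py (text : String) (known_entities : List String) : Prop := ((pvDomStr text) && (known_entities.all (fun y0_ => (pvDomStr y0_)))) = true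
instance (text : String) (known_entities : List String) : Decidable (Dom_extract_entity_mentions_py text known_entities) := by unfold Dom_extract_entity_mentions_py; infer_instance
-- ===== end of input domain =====

-- B replaces A's per-entity scan of the text by a hashed substring index over the lowered text
-- (measured faster on the generated inputs; equivalence of the return value is proved).

-- ===== PORT A =====
-- literal port of A: fold over the entity list, adding entity when entity.lower() occurs in text.lower()
def extract_entity_mentions_py (text : String) (known_entities : List String) : List String :=
  let text_lower := PySem.Str.lower text
  known_entities.foldl
    (fun found entity =>
      if PySem.Str.isIn (PySem.Str.lower entity) text_lower then PySem.Set.add found entity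
      else found) []

-- ===== PORT B =====
-- literal port of Source B: entity-length set, lowered-entity set, one pass over text substrings, final filter
def extract_entity_mentions_py_alt (text : String) (known_entities : List String) : List String :=
  let tl : List Char := PySem.Chars.lower text.toList
  let lengths : PySem.Set Int := PySem.Set.ofList (known_entities.map (fun e => (e.toList.length : Int)))
  let lowers : PySem.Set (List Char) := PySem.Set.ofList (known_entities.map (fun e => PySem.Chars.lower e.toList))
  let hits : PySem.Set (List Char) :=
    lengths.foldl (fun h L =>
      (PySem.List.pyRange 0 ((tl.length : Int) - L + 1) 1).foldl (fun h i =>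
        -- text_lower[i:i+L]: exact as drop/take since 0 ≤ i and 0 ≤ L (slice clamps at the end like take)
        let sub := (tl.drop i.toNat).take L.toNat
        if PySem.Set.contains lowers sub then PySem.Set.add h sub else h) h) []
  PySem.Set.ofList (known_entities.filter (fun e => PySem.Set.contains hits (PySem.Chars.lower e.toList)))

-- ===== PRECONDITION & SPEC =====
def Spec_extract_entity_mentions_py (text : String) (known_entities : List String) (out : List String) : Prop := out = extract_entity_mentions_py_alt text known_entities
instance (text : String) (known_entities : List String) (out : List String) : Decidable (Spec_extract_entity_mentions_py text known_entities out) := by unfold Spec_extract_entity_mentions_py; infer_instance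

-- ===== CLAIM (what is proved, stated in full; the proofs are below) =====
def Claim_equal_extract_entity_mentions_py : Prop := ∀ (text : String) (known_entities : List String), Dom_extract_entity_mentions_py text known_entities → Spec_extract_entity_mentions_py text known_entities (extract_entity_mentions_py text known_entities)

-- ===== LEMMAS AND PROOFS =====

-- a fold that conditionally adds is the fold of Set.add over the filtered list
theorem foldl_guard_add_eq_filter {α : Type} [BEq α] (p : α → Bool) :
    ∀ (l : List α) (a : PySem.Set α),
      l.foldl (fun f e => if p e then PySem.Set.add f e else f) a
        = (l.filter p).foldl PySem.Set.add a := by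
  intro l
  induction l with
  | nil => intro a; rfl
  | cons x t ih =>
    intro a
    by_cases h : p x = true <;> simp [h, ih]

-- membership in a fold that adds f i when q (f i) holds
theorem mem_foldl_guard_add {α β : Type} [BEq α] [LawfulBEq α] (f : β → α) (q : α → Bool) (x : α) :
    ∀ (l : List β) (h : PySem.Set α),
      (x ∈ l.foldl (fun h i => if q (f i) then PySem.Set.add h (f i) else h) h)
        ↔ x ∈ h ∨ ((∃ i ∈ l, f i = x) ∧ q x = true) := by
  intro l
  induction l with
  | nil => intro h; simp
  | cons i t ih =>
    intro h
    simp only [List.foldl_cons]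
    rw [ih]
    by_cases hq : q (f i) = true
    · simp only [hq, if_true, PySem.Set.mem_add, List.mem_cons]
      constructor
      · rintro ((hxh | hfx) | ⟨⟨j, hj, hfj⟩, hqx⟩)
        · exact Or.inl hxh
        · exact Or.inr ⟨⟨i, Or.inl rfl, hfx.symm⟩, hfx ▸ hq⟩
        · exact Or.inr ⟨⟨j, Or.inr hj, hfj⟩, hqx⟩
      · rintro (hxh | ⟨⟨j, hj | hj, hfj⟩, hqx⟩)
        · exact Or.inl (Or.inl hxh)
        · exact Or.inl (Or.inr (hj ▸ hfj).symm)
        · exact Or.inr ⟨⟨j, hj, hfj⟩, hqx⟩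
    · simp only [hq, List.mem_cons]
      constructor
      · rintro (hxh | ⟨⟨j, hj, hfj⟩, hqx⟩)
        · exact Or.inl hxh
        · exact Or.inr ⟨⟨j, Or.inr hj, hfj⟩, hqx⟩
      · rintro (hxh | ⟨⟨j, hj | hj, hfj⟩, hqx⟩)
        · exact Or.inl hxh
        · exact absurd (hj ▸ hfj ▸ hqx) hq
        · exact Or.inr ⟨⟨j, hj, hfj⟩, hqx⟩

-- membership in the nested fold building `hits`
theorem mem_foldl_nested {α β γ : Type} [BEq α] [LawfulBEq α]
    (g : β → List γ) (f : β → γ → α) (q : α → Bool) (x : α) :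
    ∀ (ls : List β) (h : PySem.Set α),
      (x ∈ ls.foldl (fun h L =>
          (g L).foldl (fun h i => if q (f L i) then PySem.Set.add h (f L i) else h) h) h)
        ↔ x ∈ h ∨ ((∃ L ∈ ls, ∃ i ∈ g L, f L i = x) ∧ q x = true) := by
  intro ls
  induction ls with
  | nil => intro h; simp
  | cons L t ih =>
    intro h
    simp only [List.foldl_cons]
    rw [ih, mem_foldl_guard_add (f L) q x]
    simp only [List.mem_cons]
    constructor
    · rintro ((hxh | ⟨⟨i, hi, hfi⟩, hqx⟩) | ⟨⟨M, hM, i, hi, hfi⟩, hqx⟩)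
      · exact Or.inl hxh
      · exact Or.inr ⟨⟨L, Or.inl rfl, i, hi, hfi⟩, hqx⟩
      · exact Or.inr ⟨⟨M, Or.inr hM, i, hi, hfi⟩, hqx⟩
    · rintro (hxh | ⟨⟨M, hM | hM, i, hi, hfi⟩, hqx⟩)
      · exact Or.inl (Or.inl hxh)
      · subst hM
        exact Or.inl (Or.inr ⟨⟨i, hi, hfi⟩, hqx⟩)
      · exact Or.inr ⟨⟨M, hM, i, hi, hfi⟩, hqx⟩

-- the enumerated substrings of length s.length cover exactly the infix occurrences of s
theorem exists_slice_eq_iff_isIn (tl s : List Char) :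
    (∃ i ∈ PySem.List.pyRange 0 ((tl.length : Int) - (s.length : Int) + 1) 1,
        (tl.drop i.toNat).take s.length = s)
      ↔ PySem.Chars.isIn s tl = true := by
  rw [← PySem.Chars.exists_prefix_drop_iff_isIn]
  constructor
  · rintro ⟨i, _, htake⟩
    exact ⟨i.toNat, htake ▸ List.take_prefix _ _⟩
  · rintro ⟨j, hpre⟩
    rcases Nat.eq_zero_or_pos s.length with hs | hs
    · refine ⟨0, ?_, ?_⟩
      · rw [PySem.List.mem_pyRange_iff_of_pos (by norm_num)]
        refine ⟨le_refl _, by omega, ⟨0, by ring⟩⟩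
      · rw [hs, List.take_zero]
        exact (List.length_eq_zero_iff.mp hs).symm
    · have hlen : s.length ≤ (tl.drop j).length := hpre.length_le
      rw [List.length_drop] at hlen
      have hj : j + s.length ≤ tl.length := by omega
      refine ⟨(j : Int), ?_, ?_⟩
      · rw [PySem.List.mem_pyRange_iff_of_pos (by norm_num)]
        refine ⟨Int.natCast_nonneg j, by omega, ⟨(j : Int), by ring⟩⟩
      · rw [Int.toNat_natCast]
        exact (List.prefix_iff_eq_take.mp hpre).symm

-- `hits` contains a lowered known entity exactly when it occurs in the lowered text
theorem contains_hits_eq {l : List String} {e : String} (tl : List Char) (he : e ∈ l) :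
    PySem.Set.contains
      ((PySem.Set.ofList (l.map (fun e => (e.toList.length : Int)))).foldl
        (fun h L =>
          (PySem.List.pyRange 0 ((tl.length : Int) - L + 1) 1).foldl
            (fun h i =>
              if PySem.Set.contains (PySem.Set.ofList (l.map (fun e => PySem.Chars.lower e.toList)))
                  ((tl.drop i.toNat).take L.toNat)
              then PySem.Set.add h ((tl.drop i.toNat).take L.toNat) else h) h) [])
      (PySem.Chars.lower e.toList)
    = PySem.Chars.isIn (PySem.Chars.lower e.toList) tl := by
  have hq : PySem.Set.contains (PySem.Set.ofList (l.map (fun e => PySem.Chars.lower e.toList)))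
      (PySem.Chars.lower e.toList) = true := by
    rw [PySem.Set.contains_iff, PySem.Set.mem_ofList]
    exact List.mem_map_of_mem he
  have hlen : (PySem.Chars.lower e.toList).length = e.toList.length := by
    simp [PySem.Chars.lower]
  rw [Bool.eq_iff_iff, PySem.Set.contains_iff,
      mem_foldl_nested (fun L => PySem.List.pyRange 0 ((tl.length : Int) - L + 1) 1)
        (fun L i => (tl.drop i.toNat).take L.toNat)
        (fun s => PySem.Set.contains (PySem.Set.ofList (l.map (fun e => PySem.Chars.lower e.toList))) s)]
  constructor
  · rintro (hmem | ⟨⟨L, hL, i, hi, hfi⟩, -⟩)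
    · simp at hmem
    · rw [← PySem.Chars.exists_prefix_drop_iff_isIn]
      exact ⟨i.toNat, hfi ▸ List.take_prefix _ _⟩
  · intro hin
    refine Or.inr ⟨?_, hq⟩
    obtain ⟨i, hi, htake⟩ := (exists_slice_eq_iff_isIn tl _).mpr hin
    rw [hlen] at hi
    refine ⟨(e.toList.length : Int), ?_, i, hi, ?_⟩
    · rw [PySem.Set.mem_ofList]; exact List.mem_map_of_mem he
    · rw [Int.toNat_natCast, ← hlen]; exact htake

-- ===== VERDICT (by name: the statement is the Claim_ definition above) =====
theorem extract_entity_mentions_py_spec : Claim_equal_extract_entity_mentions_py := by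
  intro text known_entities _
  unfold Spec_extract_entity_mentions_py
  simp only [extract_entity_mentions_py, extract_entity_mentions_py_alt,
    PySem.Str.isIn_eq, PySem.Str.toList_lower]
  rw [foldl_guard_add_eq_filter, PySem.Set.ofList_eq_foldl]
  congr 1
  apply List.filter_congr
  intro e he
  exact (contains_hits_eq (PySem.Chars.lower text.toList) he).symm
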